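-- pv_equiv track=rewrite | github.com/SyedZainAbbas/Python-Exercises | Data Structures/Lists.py | move_not_sorted
-- ===== SOURCE A (Python) =====
-- def move_not_sorted(num):
--     sorted_list = [num[0]]
--     unsorted_list = []
--     for i in range(1,len(num)):
--         if num[i] >= max(num[:i]):
--             sorted_list.append(num[i])
--         else:
--             unsorted_list.append(num[i])
--     return f'Your list: {num}\nSorted list: {sorted_list}\nUnsorted elements: {unsorted_list}\n'
-- ===== SOURCE B (Python) =====
-- def move_not_sorted(num):
--     # staged: prefix-maximum table, then zip+filter partition (O(n) vs A's O(n^2))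
--     pm = []
--     m = num[0]
--     for x in num:
--         m = m if m >= x else x
--         pm.append(m)
--     pairs = list(zip(num[1:], pm))
--     sorted_list = [num[0]] + [x for x, p in pairs if x >= p]
--     unsorted_list = [x for x, p in pairs if x < p]
--     return f'Your list: {num}\nSorted list: {sorted_list}\nUnsorted elements: {unsorted_list}\n'
-- ===== Notes on version B (the rewrite author's own statement) =====
-- stated objective: faster
-- what changed: Replaces A's single accumulator loop with per-element max(num[:i]) re-scans by two staged passes: first a prefix-maximum table built in one sweep, then a zip+filter partition of num[1:] against that table (O(n^2) -> O(n)).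
import Mathlib
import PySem

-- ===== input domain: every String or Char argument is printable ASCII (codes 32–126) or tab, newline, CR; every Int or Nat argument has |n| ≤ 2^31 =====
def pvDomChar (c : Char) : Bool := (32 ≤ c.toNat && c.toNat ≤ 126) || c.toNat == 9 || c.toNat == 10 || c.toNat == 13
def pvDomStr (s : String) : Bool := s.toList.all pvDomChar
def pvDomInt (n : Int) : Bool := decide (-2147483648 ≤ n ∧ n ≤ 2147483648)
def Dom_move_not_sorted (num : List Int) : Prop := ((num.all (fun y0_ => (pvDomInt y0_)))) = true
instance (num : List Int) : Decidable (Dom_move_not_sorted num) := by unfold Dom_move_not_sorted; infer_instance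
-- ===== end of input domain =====

-- B replaces A's per-element max(num[:i]) re-scan by two staged passes: a prefix-maximum table, then a zip+filter partition (O(n^2) → O(n)).

-- Python's repr of a list of ints, as used by the f-string of both versions
def fmtIntList (l : List Int) : String :=
  "[" ++ String.intercalate ", " (l.map PySem.Int.toStr) ++ "]"

-- ===== PORT A =====
def move_not_sorted (num : List Int) : String :=
  let st := (PySem.List.pyRange 1 num.length 1).foldl
    (fun (st : List Int × List Int) i =>
      let x := PySem.List.pyGetD num i 0
      -- max(num[:i]) : slice is nonempty since 1 ≤ i, so the default is never used
      if x ≥ (PySem.List.max? (PySem.List.slice num none (some i)) (fun y => y)).getD 0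
      then (st.1 ++ [x], st.2)
      else (st.1, st.2 ++ [x]))
    ([PySem.List.pyGetD num 0 0], [])
  "Your list: " ++ fmtIntList num ++ "\nSorted list: " ++ fmtIntList st.1 ++
    "\nUnsorted elements: " ++ fmtIntList st.2 ++ "\n"

-- ===== PORT B =====
def move_not_sorted_alt (num : List Int) : String :=
  let head := PySem.List.pyGetD num 0 0
  -- pass 1: prefix-maximum table pm, pm[i] = max(num[:i+1])
  let pm := (num.foldl (fun (acc : List Int × Int) x =>
      let m := if acc.2 ≥ x then acc.2 else x
      (acc.1 ++ [m], m)) ([], head)).1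
  -- pass 2: partition num[1:] against the table (zip truncates pm)
  let pairs := List.zip (PySem.List.slice num (some 1) none) pm
  let sorted_list := [head] ++ (pairs.filter (fun p => p.1 ≥ p.2)).map Prod.fst
  let unsorted_list := (pairs.filter (fun p => p.1 < p.2)).map Prod.fst
  "Your list: " ++ fmtIntList num ++ "\nSorted list: " ++ fmtIntList sorted_list ++
    "\nUnsorted elements: " ++ fmtIntList unsorted_list ++ "\n"

-- ===== PRECONDITION & SPEC =====
-- Pre_ excludes only the empty list, on which Python A raises IndexError taking the first element.
def Pre_move_not_sorted (num : List Int) : Prop := num ≠ []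
instance (num : List Int) : Decidable (Pre_move_not_sorted num) := by
  unfold Pre_move_not_sorted; infer_instance
def pvWitness_move_not_sorted : List Int := [3, 1, 4]

def Spec_move_not_sorted (num : List Int) (out : String) : Prop := out = move_not_sorted_alt num
instance (num : List Int) (out : String) : Decidable (Spec_move_not_sorted num out) := by
  unfold Spec_move_not_sorted; infer_instance

-- ===== CLAIM (what is proved, stated in full; the proofs are below) =====
def Claim_equal_move_not_sorted : Prop := ∀ (num : List Int), Dom_move_not_sorted num → Pre_move_not_sorted num → Spec_move_not_sorted num (move_not_sorted num)

-- ===== LEMMAS AND PROOFS =====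

-- A's loop body, named for the proofs
def stepA (num : List Int) (st : List Int × List Int) (i : Int) : List Int × List Int :=
  let x := PySem.List.pyGetD num i 0
  if x ≥ (PySem.List.max? (PySem.List.slice num none (some i)) (fun y => y)).getD 0
  then (st.1 ++ [x], st.2)
  else (st.1, st.2 ++ [x])

-- intermediate running-maximum step used to bridge A's loop to B's staged passes
def stepB (st : List Int × List Int × Int) (x : Int) : List Int × List Int × Int :=
  if x ≥ st.2.2 then (st.1 ++ [x], st.2.1, x) else (st.1, st.2.1 ++ [x], st.2.2)

-- reference partition: elements of t that are ≥ the running prefix max (seeded m) vs the rest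
def part (m : Int) : List Int → List Int × List Int
  | [] => ([], [])
  | x :: t => if x ≥ m then ((x :: (part x t).1), (part x t).2)
              else ((part m t).1, (x :: (part m t).2))

-- reference prefix-max scan
def scanMax (m : Int) : List Int → List Int
  | [] => []
  | x :: t => (if m ≥ x then m else x) :: scanMax (if m ≥ x then m else x) t

lemma loop_eq (h : Int) : ∀ (t pre : List Int) (s u : List Int) (m : Int),
    m = pre.foldl max h →
    (PySem.List.pyRange ((1 + pre.length : Nat) : Int) ((h :: (pre ++ t)).length : Int) 1).foldl
        (stepA (h :: (pre ++ t))) (s, u)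
      = (let r := t.foldl stepB (s, u, m); (r.1, r.2.1)) := by
  intro t
  induction t with
  | nil =>
    intro pre s u m hm
    rw [PySem.List.pyRange_one_eq_nil (by simp)]
    simp [List.foldl]
  | cons x t ih =>
    intro pre s u m hm
    have hlen : ((1 + pre.length : Nat) : Int) < ((h :: (pre ++ x :: t)).length : Int) := by
      simp; omega
    rw [PySem.List.pyRange_one_cons hlen]
    simp only [List.foldl_cons]
    have hx : PySem.List.pyGetD (h :: (pre ++ x :: t)) ((1 + pre.length : Nat) : Int) 0 = x := by
      rw [PySem.List.pyGetD_natCast]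
      have : h :: (pre ++ x :: t) = (h :: pre) ++ x :: t := by simp
      rw [this]
      have : (1 + pre.length) = (h :: pre).length := by simp [Nat.add_comm]
      rw [this, List.getD, List.getElem?_append_right (by simp)]
      simp
    have hslice : PySem.List.slice (h :: (pre ++ x :: t)) none (some ((1 + pre.length : Nat) : Int))
        = h :: pre := by
      rw [PySem.List.slice_to_natCast]
      have : h :: (pre ++ x :: t) = (h :: pre) ++ x :: t := by simp
      rw [this]
      have : (1 + pre.length) = (h :: pre).length := by simp [Nat.add_comm]
      rw [this, List.take_left]
    have hmax : (PySem.List.max? (PySem.List.slice (h :: (pre ++ x :: t)) none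
        (some ((1 + pre.length : Nat) : Int))) (fun y => y)).getD 0 = m := by
      rw [hslice, PySem.List.max?_id_cons]
      simp [hm]
    by_cases hc : x ≥ m
    · have hA : stepA (h :: (pre ++ x :: t)) (s, u) ((1 + pre.length : Nat) : Int)
          = (s ++ [x], u) := by
        simp only [stepA, hx, hmax]
        rw [if_pos hc]
      have hB : stepB (s, u, m) x = (s ++ [x], u, x) := by
        simp only [stepB]; rw [if_pos hc]
      rw [hA]
      have hrec := ih (pre ++ [x]) (s ++ [x]) u x
        (by rw [List.foldl_append, ← hm]; simp [max_eq_right hc])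
      have hcast : ((1 + (pre ++ [x]).length : Nat) : Int) = ((1 + pre.length : Nat) : Int) + 1 := by
        simp; ring
      have hlist : (h :: (pre ++ [x] ++ t)) = (h :: (pre ++ x :: t)) := by simp
      rw [hcast, hlist] at hrec
      rw [hrec]
      simp [hB]
    · have hA : stepA (h :: (pre ++ x :: t)) (s, u) ((1 + pre.length : Nat) : Int)
          = (s, u ++ [x]) := by
        simp only [stepA, hx, hmax]
        rw [if_neg hc]
      have hB : stepB (s, u, m) x = (s, u ++ [x], m) := by
        simp only [stepB]; rw [if_neg hc]
      rw [hA]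
      have hrec := ih (pre ++ [x]) s (u ++ [x]) m
        (by rw [List.foldl_append, ← hm]
            simp [max_eq_left (le_of_lt (lt_of_not_ge hc))])
      have hcast : ((1 + (pre ++ [x]).length : Nat) : Int) = ((1 + pre.length : Nat) : Int) + 1 := by
        simp; ring
      have hlist : (h :: (pre ++ [x] ++ t)) = (h :: (pre ++ x :: t)) := by simp
      rw [hcast, hlist] at hrec
      rw [hrec]
      simp [hB]

-- the running-maximum fold computes the reference partition
lemma foldB_part : ∀ (t : List Int) (s u : List Int) (m : Int),
    (t.foldl stepB (s, u, m)).1 = s ++ (part m t).1 ∧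
    (t.foldl stepB (s, u, m)).2.1 = u ++ (part m t).2 := by
  intro t
  induction t with
  | nil => intro s u m; simp [part]
  | cons x t ih =>
    intro s u m
    by_cases hc : x ≥ m
    · obtain ⟨i1, i2⟩ := ih (s ++ [x]) u x
      simp only [List.foldl_cons, stepB, if_pos hc, part]
      exact ⟨by rw [i1]; simp, by rw [i2]⟩
    · obtain ⟨i1, i2⟩ := ih s (u ++ [x]) m
      simp only [List.foldl_cons, stepB, if_neg hc, part]
      exact ⟨by rw [i1], by rw [i2]; simp⟩

-- B's table-building fold is the reference prefix-max scan
lemma pm_fold : ∀ (t : List Int) (acc : List Int) (m : Int),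
    (t.foldl (fun (acc : List Int × Int) x =>
        let m := if acc.2 ≥ x then acc.2 else x
        (acc.1 ++ [m], m)) (acc, m)).1 = acc ++ scanMax m t := by
  intro t
  induction t with
  | nil => intro acc m; simp [scanMax]
  | cons x t ih =>
    intro acc m
    simp only [List.foldl_cons, scanMax]
    rw [ih]
    simp

-- B's zip+filter partition against the prefix-max table equals the reference partition
lemma zip_filter_part : ∀ (t : List Int) (m : Int),
    ((List.zip t (m :: scanMax m t)).filter (fun p => p.2 ≤ p.1)).map Prod.fst = (part m t).1 ∧
    ((List.zip t (m :: scanMax m t)).filter (fun p => p.1 < p.2)).map Prod.fst = (part m t).2 := by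
  intro t
  induction t with
  | nil => intro m; simp [part]
  | cons x t ih =>
    intro m
    by_cases hc : m ≤ x
    · have hm' : (if m ≥ x then m else x) = x := by
        by_cases h2 : m ≥ x
        · simp only [if_pos h2]; omega
        · simp only [if_neg h2]
      obtain ⟨i1, i2⟩ := ih x
      have hp : part m (x :: t) = (x :: (part x t).1, (part x t).2) := by
        simp only [part, if_pos (show x ≥ m from hc)]
      refine ⟨?_, ?_⟩ <;>
        simp [scanMax, hm', hc, not_lt.mpr hc, hp, i1, i2]
    · have hlt : x < m := lt_of_not_ge hc
      have hm' : (if m ≥ x then m else x) = m := by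
        simp only [if_pos (le_of_lt hlt)]
      obtain ⟨i1, i2⟩ := ih m
      have hp : part m (x :: t) = ((part m t).1, x :: (part m t).2) := by
        simp only [part, if_neg (show ¬ x ≥ m from hc)]
      refine ⟨?_, ?_⟩ <;>
        simp [scanMax, hm', hc, hlt, hp, i1, i2]

-- ===== VERDICT (by name: the statement is the Claim_ definition above) =====
theorem move_not_sorted_spec : Claim_equal_move_not_sorted := by
  intro num _ hpre
  unfold Spec_move_not_sorted move_not_sorted move_not_sorted_alt
  cases num with
  | nil => exact absurd rfl hpre
  | cons h t =>
    have hhead : PySem.List.pyGetD (h :: t) 0 0 = h := by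
      simp [PySem.List.pyGetD_zero_cons]
    have hsl : PySem.List.slice (h :: t) (some 1) none = t := by
      rw [PySem.List.slice_from_one]; rfl
    obtain ⟨a1, a2⟩ := foldB_part t [h] [] h
    obtain ⟨z1, z2⟩ := zip_filter_part t h
    -- A side: the range loop equals the reference partition
    have hkey := loop_eq h t [] [PySem.List.pyGetD (h :: t) 0 0] [] h (by simp)
    simp only [List.nil_append, List.length_nil, Nat.add_zero, Nat.cast_one, hhead] at hkey
    have eA : List.foldl (fun (st : List Int × List Int) i =>
        if PySem.List.pyGetD (h :: t) i 0 ≥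
            (PySem.List.max? (PySem.List.slice (h :: t) none (some i)) fun y => y).getD 0
        then (st.1 ++ [PySem.List.pyGetD (h :: t) i 0], st.2)
        else (st.1, st.2 ++ [PySem.List.pyGetD (h :: t) i 0]))
        ([h], []) (PySem.List.pyRange 1 ((h :: t).length : Int) 1)
        = ([h] ++ (part h t).1, [] ++ (part h t).2) :=
      hkey.trans (by rw [a1, a2])
    -- B side: the prefix-max table is the reference scan
    have eB : (List.foldl (fun (acc : List Int × Int) x =>
        let m := if acc.2 ≥ x then acc.2 else x
        (acc.1 ++ [m], m)) ([], h) (h :: t)).1 = h :: scanMax h t := by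
      rw [pm_fold (h :: t) [] h]
      simp [scanMax]
    -- B side: the zip+filter partition (≥ is definitionally flipped ≤)
    have z1' : ((List.zip t (h :: scanMax h t)).filter
        (fun p : Int × Int => p.1 ≥ p.2)).map Prod.fst = (part h t).1 := z1
    simp only [hhead, hsl, eB]
    rw [eA, z1', z2]
    simp
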